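-- pv_equiv track=rewrite | github.com/DetectHensenberg/RAG4JZDQ | .github/skills/bid-param-extractor/scripts/merge_params.py | _deduplicate_params
-- ===== SOURCE A (Python) =====
-- from typing import Any, Dict, List
--
-- def _deduplicate_params(
--     params: List[Dict[str, str]],
-- ) -> List[Dict[str, str]]:
--     """Deduplicate params by name, keeping the most detailed value.
--
--     Args:
--         params: List of {"name", "value", "unit", "page", "section"} dicts.
--
--     Returns:
--         Deduplicated list with longest/most detailed values preserved.
--     """
--     seen: Dict[str, Dict[str, str]] = {}
--
--     for p in params:
--         name = (p.get("name") or "").strip()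
--         if not name:
--             continue
--
--         value = (p.get("value") or "").strip()
--         unit = (p.get("unit") or "").strip()
--         page = p.get("page", 0)
--         section = (p.get("section") or "").strip()
--
--         if name not in seen:
--             seen[name] = {
--                 "name": name, "value": value, "unit": unit,
--                 "page": page, "section": section,
--             }
--         else:
--             existing = seen[name]
--             if len(value) > len(str(existing["value"])):
--                 existing["value"] = value
--                 existing["page"] = page
--                 existing["section"] = section
--             if len(unit) > len(str(existing.get("unit", ""))):
--                 existing["unit"] = unit
--
--     return list(seen.values())
-- ===== SOURCE B (Python) =====
-- from typing import Dict, List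
--
--
-- def _deduplicate_params(
--     params: List[Dict[str, str]],
-- ) -> List[Dict[str, str]]:
--     """Two-phase rewrite: group stripped records by name, then pick per group
--     the record with the longest value (earliest on ties) for value/page/section
--     and, independently, the longest unit (earliest on ties)."""
--     groups: Dict[str, List[tuple]] = {}
--     for p in params:
--         name = (p.get("name") or "").strip()
--         if not name:
--             continue
--         rec = (
--             (p.get("value") or "").strip(),
--             (p.get("unit") or "").strip(),
--             p.get("page", 0),
--             (p.get("section") or "").strip(),
--         )
--         groups.setdefault(name, []).append(rec)
--
--     out: List[Dict[str, str]] = []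
--     for name, recs in groups.items():
--         best = recs[0]
--         for r in recs[1:]:
--             if len(r[0]) > len(best[0]):
--                 best = r
--         unit = recs[0][1]
--         for r in recs[1:]:
--             if len(r[1]) > len(unit):
--                 unit = r[1]
--         out.append({
--             "name": name, "value": best[0], "unit": unit,
--             "page": best[2], "section": best[3],
--         })
--     return out
-- ===== Notes on version B (the rewrite author's own statement) =====
-- stated objective: alternative
-- what changed: A keeps one result dict per name and conditionally mutates it in place on every duplicate; B is a two-phase decomposition: it first groups the stripped records by name into an order-preserving dict of lists, then assembles each output dict from two independent first-of-the-maxima scans (longest value carrying page/section, and longest unit) over the group.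
import Mathlib
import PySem

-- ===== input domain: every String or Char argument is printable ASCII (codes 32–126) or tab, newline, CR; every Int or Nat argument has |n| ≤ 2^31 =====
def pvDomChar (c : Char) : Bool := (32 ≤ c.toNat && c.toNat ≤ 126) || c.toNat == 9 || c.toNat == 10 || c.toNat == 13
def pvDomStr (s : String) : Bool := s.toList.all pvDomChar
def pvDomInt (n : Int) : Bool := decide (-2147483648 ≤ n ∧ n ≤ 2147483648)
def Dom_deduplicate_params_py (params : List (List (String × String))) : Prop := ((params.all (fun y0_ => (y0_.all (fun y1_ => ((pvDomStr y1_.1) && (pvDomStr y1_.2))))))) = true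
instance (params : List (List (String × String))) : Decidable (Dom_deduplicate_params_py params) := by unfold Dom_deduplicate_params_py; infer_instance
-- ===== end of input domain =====

-- B replaces A's mutate-the-winning-dict-in-place loop by a two-phase decomposition
-- (group records by name, then take two independent first-of-the-maxima per group);
-- objective: alternative decomposition, same cost. Return values only (neither mutates its argument).

-- ===== PORT A =====
-- (p.get(k) or "") : a missing key and a present-but-empty value both give "" — getD with default "".
-- One iteration of A's `for p in params` loop over the accumulator `seen`.
def aStep (seen : PySem.Dict String (PySem.Dict String String)) (p : List (String × String)) :
    PySem.Dict String (PySem.Dict String String) :=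
  let name := PySem.Str.strip (PySem.Dict.getD (PySem.Dict.mk p) "name" "")
  if name = "" then seen
  else
    let value := PySem.Str.strip (PySem.Dict.getD (PySem.Dict.mk p) "value" "")
    let unit := PySem.Str.strip (PySem.Dict.getD (PySem.Dict.mk p) "unit" "")
    -- p.get("page", 0): Python's default 0 is an int; Pre_ excludes the inputs where it is used,
    -- so the string default "0" below is never looked at on admitted inputs.
    let page := PySem.Dict.getD (PySem.Dict.mk p) "page" "0"
    let sect := PySem.Str.strip (PySem.Dict.getD (PySem.Dict.mk p) "section" "")
    if !PySem.Dict.contains seen name then   -- `if name not in seen`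
      PySem.Dict.insert seen name (PySem.Dict.ofList
        [("name", name), ("value", value), ("unit", unit), ("page", page), ("section", sect)])
    else
      -- existing = seen[name]; the key is present, so the getD default is never looked at
      let existing := PySem.Dict.getD seen name PySem.Dict.empty
      -- Python mutates `existing` in place = overwrite-in-place inserts, re-stored into seen
      let existing1 :=
        if PySem.Str.len value > PySem.Str.len (PySem.Dict.getD existing "value" "") then
          PySem.Dict.insert (PySem.Dict.insert (PySem.Dict.insert existing "value" value)
            "page" page) "section" sect
        else existing
      let existing2 :=
        if PySem.Str.len unit > PySem.Str.len (PySem.Dict.getD existing1 "unit" "") then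
          PySem.Dict.insert existing1 "unit" unit
        else existing1
      PySem.Dict.insert seen name existing2

def deduplicate_params_py (params : List (List (String × String))) : List (List (String × String)) :=
  ((params.foldl aStep PySem.Dict.empty).values).map PySem.Dict.items

-- ===== PORT B =====
-- one stripped record: (value, unit, page, section)
def bRec (p : List (String × String)) : String × String × String × String :=
  (PySem.Str.strip (PySem.Dict.getD (PySem.Dict.mk p) "value" ""),
   PySem.Str.strip (PySem.Dict.getD (PySem.Dict.mk p) "unit" ""),
   PySem.Dict.getD (PySem.Dict.mk p) "page" "0",   -- p.get("page", 0); see the comment in port A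
   PySem.Str.strip (PySem.Dict.getD (PySem.Dict.mk p) "section" ""))

-- phase 1: groups.setdefault(name, []).append(rec) — the key keeps its position (appends if
-- new) and its value becomes old ++ [rec]: exactly insert with getD.
def bStep (groups : PySem.Dict String (List (String × String × String × String)))
    (p : List (String × String)) : PySem.Dict String (List (String × String × String × String)) :=
  let name := PySem.Str.strip (PySem.Dict.getD (PySem.Dict.mk p) "name" "")
  if name = "" then groups
  else PySem.Dict.insert groups name (PySem.Dict.getD groups name [] ++ [bRec p])

-- phase 2, one group: best-value record (first among ties) and, independently, the longest unit
def bAssemble (name : String) (recs : List (String × String × String × String)) :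
    List (String × String) :=
  match recs with
  | [] => []   -- unreachable: every group holds at least one record
  | r0 :: rest =>
      let best := rest.foldl
        (fun best r => if PySem.Str.len r.1 > PySem.Str.len best.1 then r else best) r0
      let unit := rest.foldl
        (fun u r => if PySem.Str.len r.2.1 > PySem.Str.len u then r.2.1 else u) r0.2.1
      [("name", name), ("value", best.1), ("unit", unit), ("page", best.2.2.1),
       ("section", best.2.2.2)]

def deduplicate_params_py_alt (params : List (List (String × String))) :
    List (List (String × String)) :=
  ((params.foldl bStep PySem.Dict.empty).items).map (fun it => bAssemble it.1 it.2)

-- ===== PRECONDITION & SPEC =====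
-- Pre_ excludes inputs where a param whose stripped name is non-empty lacks the "page" key:
-- there Python A (and B) put the int default 0 into the str-typed result dict, a value outside
-- the declared dict[str, str] return type, which List (String × String) cannot represent.
def Pre_deduplicate_params_py (params : List (List (String × String))) : Prop :=
  ∀ p ∈ params,
    PySem.Str.strip (PySem.Dict.getD (PySem.Dict.mk p) "name" "") ≠ "" →
      PySem.Dict.contains (PySem.Dict.mk p) "page" = true

instance (params : List (List (String × String))) : Decidable (Pre_deduplicate_params_py params) := by
  unfold Pre_deduplicate_params_py; infer_instance

def pvWitness_deduplicate_params_py : (List (List (String × String))) :=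
  [[("name", "a"), ("value", "1 mm"), ("unit", "mm"), ("page", "3"), ("section", "2.1")],
   [("name", "a"), ("value", "1"), ("unit", "millimetre"), ("page", "4"), ("section", "2.2")]]

def Spec_deduplicate_params_py (params : List (List (String × String))) (out : List (List (String × String))) : Prop := out = deduplicate_params_py_alt params
instance (params : List (List (String × String))) (out : List (List (String × String))) : Decidable (Spec_deduplicate_params_py params out) := by unfold Spec_deduplicate_params_py; infer_instance

-- ===== CLAIM (what is proved, stated in full; the proofs are below) =====
def Claim_equal_deduplicate_params_py : Prop := ∀ (params : List (List (String × String))), Dom_deduplicate_params_py params → Pre_deduplicate_params_py params → Spec_deduplicate_params_py params (deduplicate_params_py params)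

-- ===== LEMMAS AND PROOFS =====

-- B's two phase-2 folds, named for the proofs
def bestV (r0 : String × String × String × String)
    (rest : List (String × String × String × String)) : String × String × String × String :=
  rest.foldl (fun best r => if PySem.Str.len r.1 > PySem.Str.len best.1 then r else best) r0

def bestU (u0 : String) (rest : List (String × String × String × String)) : String :=
  rest.foldl (fun u r => if PySem.Str.len r.2.1 > PySem.Str.len u then r.2.1 else u) u0

theorem bAssemble_cons (name : String) (r0 : String × String × String × String)
    (rest : List (String × String × String × String)) :
    bAssemble name (r0 :: rest) =
      [("name", name), ("value", (bestV r0 rest).1), ("unit", bestU r0.2.1 rest),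
       ("page", (bestV r0 rest).2.2.1), ("section", (bestV r0 rest).2.2.2)] := rfl

theorem bestV_concat (r0 r : String × String × String × String)
    (rest : List (String × String × String × String)) :
    bestV r0 (rest ++ [r]) =
      if PySem.Str.len r.1 > PySem.Str.len (bestV r0 rest).1 then r else bestV r0 rest := by
  unfold bestV; rw [List.foldl_append]; simp only [List.foldl_cons, List.foldl_nil]

theorem bestU_concat (u0 : String) (r : String × String × String × String)
    (rest : List (String × String × String × String)) :
    bestU u0 (rest ++ [r]) =
      if PySem.Str.len r.2.1 > PySem.Str.len (bestU u0 rest) then r.2.1 else bestU u0 rest := by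
  unfold bestU; rw [List.foldl_append]; simp only [List.foldl_cons, List.foldl_nil]

theorem bAssemble_concat (name : String) (r0 r : String × String × String × String)
    (rest : List (String × String × String × String)) :
    bAssemble name (r0 :: (rest ++ [r])) =
      [("name", name),
       ("value", if PySem.Str.len r.1 > PySem.Str.len (bestV r0 rest).1 then r.1
                 else (bestV r0 rest).1),
       ("unit", if PySem.Str.len r.2.1 > PySem.Str.len (bestU r0.2.1 rest) then r.2.1
                else bestU r0.2.1 rest),
       ("page", if PySem.Str.len r.1 > PySem.Str.len (bestV r0 rest).1 then r.2.2.1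
                else (bestV r0 rest).2.2.1),
       ("section", if PySem.Str.len r.1 > PySem.Str.len (bestV r0 rest).1 then r.2.2.2
                   else (bestV r0 rest).2.2.2)] := by
  rw [bAssemble_cons, bestV_concat, bestU_concat]
  simp [apply_ite]

-- A's in-place conditional update of an assembled dict, field by field
set_option maxHeartbeats 1600000 in
theorem dict_update (nm bv bu bp bs v u pg sc : String) :
    (if PySem.Str.len u > PySem.Str.len (PySem.Dict.getD
        (if PySem.Str.len v > PySem.Str.len (PySem.Dict.getD
            (PySem.Dict.ofList [("name", nm), ("value", bv), ("unit", bu), ("page", bp), ("section", bs)]) "value" "") then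
          PySem.Dict.insert (PySem.Dict.insert (PySem.Dict.insert
            (PySem.Dict.ofList [("name", nm), ("value", bv), ("unit", bu), ("page", bp), ("section", bs)])
            "value" v) "page" pg) "section" sc
        else PySem.Dict.ofList [("name", nm), ("value", bv), ("unit", bu), ("page", bp), ("section", bs)]) "unit" "") then
      PySem.Dict.insert
        (if PySem.Str.len v > PySem.Str.len (PySem.Dict.getD
            (PySem.Dict.ofList [("name", nm), ("value", bv), ("unit", bu), ("page", bp), ("section", bs)]) "value" "") then
          PySem.Dict.insert (PySem.Dict.insert (PySem.Dict.insert
            (PySem.Dict.ofList [("name", nm), ("value", bv), ("unit", bu), ("page", bp), ("section", bs)])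
            "value" v) "page" pg) "section" sc
        else PySem.Dict.ofList [("name", nm), ("value", bv), ("unit", bu), ("page", bp), ("section", bs)]) "unit" u
    else
      (if PySem.Str.len v > PySem.Str.len (PySem.Dict.getD
          (PySem.Dict.ofList [("name", nm), ("value", bv), ("unit", bu), ("page", bp), ("section", bs)]) "value" "") then
        PySem.Dict.insert (PySem.Dict.insert (PySem.Dict.insert
          (PySem.Dict.ofList [("name", nm), ("value", bv), ("unit", bu), ("page", bp), ("section", bs)])
          "value" v) "page" pg) "section" sc
      else PySem.Dict.ofList [("name", nm), ("value", bv), ("unit", bu), ("page", bp), ("section", bs)])) =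
    PySem.Dict.ofList
      [("name", nm),
       ("value", if PySem.Str.len v > PySem.Str.len bv then v else bv),
       ("unit", if PySem.Str.len u > PySem.Str.len bu then u else bu),
       ("page", if PySem.Str.len v > PySem.Str.len bv then pg else bp),
       ("section", if PySem.Str.len v > PySem.Str.len bv then sc else bs)] := by
  rw [show PySem.Dict.getD
      (PySem.Dict.ofList [("name", nm), ("value", bv), ("unit", bu), ("page", bp), ("section", bs)])
      "value" "" = bv from rfl]
  by_cases hv : PySem.Str.len v > PySem.Str.len bv
  · simp only [if_pos hv]
    rw [show PySem.Dict.getD (PySem.Dict.insert (PySem.Dict.insert (PySem.Dict.insert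
        (PySem.Dict.ofList [("name", nm), ("value", bv), ("unit", bu), ("page", bp), ("section", bs)])
        "value" v) "page" pg) "section" sc) "unit" "" = bu from rfl]
    by_cases hu : PySem.Str.len u > PySem.Str.len bu
    · simp only [if_pos hu]; rfl
    · simp only [if_neg hu]; rfl
  · simp only [if_neg hv]
    rw [show PySem.Dict.getD
        (PySem.Dict.ofList [("name", nm), ("value", bv), ("unit", bu), ("page", bp), ("section", bs)])
        "unit" "" = bu from rfl]
    by_cases hu : PySem.Str.len u > PySem.Str.len bu
    · simp only [if_pos hu]; rfl
    · simp only [if_neg hu]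

-- the A-side image of one group entry: B's assembled record list, as the dict A keeps in `seen`
def entryImg (it : String × List (String × String × String × String)) :
    String × PySem.Dict String String :=
  (it.1, PySem.Dict.ofList (bAssemble it.1 it.2))

-- the A-side accumulator determined by the B-side accumulator
def mkSeen (G : PySem.Dict String (List (String × String × String × String))) :
    PySem.Dict String (PySem.Dict String String) :=
  PySem.Dict.mk (G.items.map entryImg)

-- the invariant carried along the fold: keys unique, every group non-empty
def GInv (G : PySem.Dict String (List (String × String × String × String))) : Prop :=
  G.keys.Nodup ∧ ∀ it ∈ G.items, it.2 ≠ []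

theorem get?_mkSeen (G : PySem.Dict String (List (String × String × String × String)))
    (n : String) :
    (mkSeen G).get? n = (G.get? n).map (fun recs => PySem.Dict.ofList (bAssemble n recs)) := by
  show Option.map (fun x => x.2)
      (List.find? (fun p => p.1 == n) (G.items.map entryImg)) = _
  rw [List.find?_map]
  cases hf : List.find? (fun p => p.1 == n) G.items with
  | none =>
      have h0 : List.find? ((fun p => p.1 == n) ∘ entryImg) G.items = none := by
        rw [List.find?_eq_none] at hf ⊢
        intro x hx; exact hf x hx
      rw [h0]
      show none = Option.map _ (Option.map (fun x => x.2) (List.find? (fun p => p.1 == n) G.items))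
      rw [hf]; rfl
  | some q =>
      have hq : List.find? ((fun p => p.1 == n) ∘ entryImg) G.items = some q := by
        rw [List.find?_eq_some_iff_append] at hf ⊢
        obtain ⟨h1, as, bs, h2, h3⟩ := hf
        exact ⟨h1, as, bs, h2, fun a ha => h3 a ha⟩
      have hqn : q.1 = n := by
        have := List.find?_some hf
        simpa using this
      rw [hq]
      show some (PySem.Dict.ofList (bAssemble q.1 q.2)) =
        Option.map _ (Option.map (fun x => x.2) (List.find? (fun p => p.1 == n) G.items))
      rw [hf, hqn]; rfl

set_option maxHeartbeats 1600000 in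
theorem step_comm (G : PySem.Dict String (List (String × String × String × String)))
    (hInv : GInv G) (p : List (String × String)) :
    aStep (mkSeen G) p = mkSeen (bStep G p) := by
  obtain ⟨hnd, hne⟩ := hInv
  unfold aStep bStep
  by_cases hname : PySem.Str.strip (PySem.Dict.getD (PySem.Dict.mk p) "name" "") = ""
  · rw [if_pos hname, if_pos hname]
  · rw [if_neg hname, if_neg hname]
    set name := PySem.Str.strip (PySem.Dict.getD (PySem.Dict.mk p) "name" "") with hnm
    cases hget : G.get? name with
    | none =>
        have hc : G.contains name = false := by
          have := PySem.Dict.contains_eq_isSome_get? G name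
          rw [hget] at this; simpa using this
        have hmk : (mkSeen G).get? name = none := by rw [get?_mkSeen, hget]; rfl
        have hcm : (mkSeen G).contains name = false := by
          have := PySem.Dict.contains_eq_isSome_get? (mkSeen G) name
          rw [hmk] at this; simpa using this
        have hgd : PySem.Dict.getD G name [] = [] :=
          PySem.Dict.getD_of_get?_eq_none G [] hget
        rw [hcm, hgd]
        simp only [Bool.not_false, if_true]
        apply PySem.Dict.ext
        rw [PySem.Dict.items_insert_of_not_contains _ _ hcm]
        show _ = (mkSeen (PySem.Dict.insert G name ([] ++ [bRec p]))).items
        unfold mkSeen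
        rw [PySem.Dict.items_insert_of_not_contains _ _ hc]
        show (G.items.map entryImg) ++ _ = (G.items ++ [(name, [] ++ [bRec p])]).map entryImg
        rw [List.map_append]
        congr 1
    | some recs =>
        have hc : G.contains name = true := by
          have := PySem.Dict.contains_eq_isSome_get? G name
          rw [hget] at this; simpa using this
        have hmk : (mkSeen G).get? name =
            some (PySem.Dict.ofList (bAssemble name recs)) := by rw [get?_mkSeen, hget]; rfl
        have hcm : (mkSeen G).contains name = true := by
          have := PySem.Dict.contains_eq_isSome_get? (mkSeen G) name
          rw [hmk] at this; simpa using this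
        have hgdA : PySem.Dict.getD (mkSeen G) name PySem.Dict.empty =
            PySem.Dict.ofList (bAssemble name recs) :=
          PySem.Dict.getD_of_get?_eq_some (mkSeen G) PySem.Dict.empty hmk
        have hgd : PySem.Dict.getD G name [] = recs :=
          PySem.Dict.getD_of_get?_eq_some G [] hget
        have hrecs : recs ≠ [] := by
          intro h
          exact hne (name, recs) (PySem.Dict.mem_items_of_get?_eq_some G hget) (by simpa using h)
        obtain ⟨r0, rest, rfl⟩ : ∃ r0 rest, recs = r0 :: rest := by
          cases recs with
          | nil => exact absurd rfl hrecs
          | cons a l => exact ⟨a, l, rfl⟩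
        rw [hcm, hgdA, hgd]
        simp only [Bool.not_true, Bool.false_eq_true, if_false]
        apply PySem.Dict.ext
        rw [PySem.Dict.items_insert_of_contains _ _ hcm]
        show ((mkSeen G).items).map _ =
          (mkSeen (PySem.Dict.insert G name ((r0 :: rest) ++ [bRec p]))).items
        unfold mkSeen
        rw [PySem.Dict.items_insert_of_contains _ _ hc]
        simp only [List.map_map]
        apply List.map_congr_left
        intro q hq
        by_cases hqn : q.1 = name
        · have hq2 : q.2 = r0 :: rest := by
            have := PySem.Dict.get?_of_mem_items (d := G) (k := q.1) (v := q.2)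
              (by simpa using hq) hnd
            rw [hqn, hget] at this
            exact (Option.some_injective _ this).symm
          simp only [Function.comp, hqn, beq_self_eq_true, if_true, entryImg, hq2]
          refine congrArg (fun d => (name, d)) ?_
          -- A's conditional update of the assembled dict = B's assembly of the extended group
          rw [show (r0 :: rest) ++ [bRec p] = r0 :: (rest ++ [bRec p]) from rfl,
              bAssemble_concat]
          exact dict_update name (bestV r0 rest).1 (bestU r0.2.1 rest) (bestV r0 rest).2.2.1
            (bestV r0 rest).2.2.2 (bRec p).1 (bRec p).2.1 (bRec p).2.2.1 (bRec p).2.2.2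
        · simp only [Function.comp, entryImg]
          rw [if_neg (by simpa using hqn), if_neg (by simpa using hqn)]

theorem inv_step (G : PySem.Dict String (List (String × String × String × String)))
    (hInv : GInv G) (p : List (String × String)) : GInv (bStep G p) := by
  obtain ⟨hnd, hne⟩ := hInv
  unfold bStep
  by_cases hname : PySem.Str.strip (PySem.Dict.getD (PySem.Dict.mk p) "name" "") = ""
  · rw [if_pos hname]; exact ⟨hnd, hne⟩
  · rw [if_neg hname]
    constructor
    · exact PySem.Dict.nodup_keys_insert _ _ _ hnd
    · intro it hit
      rcases (PySem.Dict.mem_items_insert _ _ _ _).1 hit with h | h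
      · subst h; simp
      · exact hne it h.1

theorem fold_comm (params : List (List (String × String)))
    (G : PySem.Dict String (List (String × String × String × String))) (hInv : GInv G) :
    params.foldl aStep (mkSeen G) = mkSeen (params.foldl bStep G) := by
  induction params generalizing G with
  | nil => rfl
  | cons p t ih =>
      simp only [List.foldl_cons]
      rw [step_comm G hInv p]
      exact ih (bStep G p) (inv_step G hInv p)

theorem items_ofList_bAssemble (name : String)
    (recs : List (String × String × String × String)) :
    (PySem.Dict.ofList (bAssemble name recs)).items = bAssemble name recs := by
  cases recs with
  | nil => rfl
  | cons r0 rest => rfl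

-- ===== VERDICT (by name: the statement is the Claim_ definition above) =====
theorem deduplicate_params_py_spec : Claim_equal_deduplicate_params_py := by
  intro params _ _
  show deduplicate_params_py params = deduplicate_params_py_alt params
  unfold deduplicate_params_py deduplicate_params_py_alt
  have h0 : GInv PySem.Dict.empty := ⟨List.nodup_nil, by intro it hit; cases hit⟩
  have hm : (PySem.Dict.empty : PySem.Dict String (PySem.Dict String String)) =
      mkSeen PySem.Dict.empty := rfl
  rw [hm, fold_comm params PySem.Dict.empty h0]
  set Gf := params.foldl bStep PySem.Dict.empty
  show ((Gf.items.map entryImg).map Prod.snd).map PySem.Dict.items = _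
  rw [List.map_map, List.map_map]
  apply List.map_congr_left
  intro it _
  exact items_ofList_bAssemble it.1 it.2
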